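-- pv_equiv track=rewrite | github.com/quangdang46/TH-DSTT | Assignment2022/Code Ver 2/StudentID.py | req7
-- ===== SOURCE A (Python) =====
-- def req7(transactions, history):
--     # ["I1","I2","I3","I4","I5","I6"]
--     list_I=[]
--     for element in transactions:
--         for i in element[1]:
--             list_I.append(i)
--     list_I=list(set(list_I))
--     list_I.sort()
--     # Dem so lan xuat hien
--     list_cnt=[0]*len(list_I)
--
--     # tim khach hang it giao dich nhat
--     list_min_len=[]
--     for element in history:
--         list_min_len.append(len(element[1]))
--     list_T=[]
--     for element in history:
--         if len(element[1])==min(list_min_len):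
--             for i in element[1]:
--                 list_T.append(i)
--     for element in transactions:
--         if element[0] in list_T:
--             for i in element[1]:
--                 list_cnt[list_I.index(i)]+=1
--     max_value=max(list_cnt)
--     list_result=[list_I[i] for i in range(len(list_I)) if list_cnt[i]==max_value]
--     return list_result
-- ===== SOURCE B (Python) =====
-- def req7(transactions, history):
--     # Index: transaction id -> concatenation of its item lists (duplicates accumulate).
--     index = {}
--     for tid, items in transactions:
--         index.setdefault(tid, []).extend(items)
--     universe = sorted(set(i for _, items in transactions for i in items))
--     qual = set()
--     if history:
--         m = min(len(items) for _, items in history)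
--         qual = set(i for _, items in history if len(items) == m for i in items)
--     counts = {i: 0 for i in universe}
--     for tid in qual:
--         for i in index.get(tid, []):
--             counts[i] += 1
--     best = max(counts.values())
--     return [i for i in universe if counts[i] == best]
-- ===== Notes on version B (the rewrite author's own statement) =====
-- stated objective: faster
-- what changed: B inverts the counting loop: instead of scanning all transactions and testing 'id in list_T' plus a linear list.index per item, B builds a dict index id->items once, computes the qualifying-id SET of the least-active customers, and iterates that set looking ids up in the index, with counts kept in a dict over the sorted item universe.
import Mathlib
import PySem

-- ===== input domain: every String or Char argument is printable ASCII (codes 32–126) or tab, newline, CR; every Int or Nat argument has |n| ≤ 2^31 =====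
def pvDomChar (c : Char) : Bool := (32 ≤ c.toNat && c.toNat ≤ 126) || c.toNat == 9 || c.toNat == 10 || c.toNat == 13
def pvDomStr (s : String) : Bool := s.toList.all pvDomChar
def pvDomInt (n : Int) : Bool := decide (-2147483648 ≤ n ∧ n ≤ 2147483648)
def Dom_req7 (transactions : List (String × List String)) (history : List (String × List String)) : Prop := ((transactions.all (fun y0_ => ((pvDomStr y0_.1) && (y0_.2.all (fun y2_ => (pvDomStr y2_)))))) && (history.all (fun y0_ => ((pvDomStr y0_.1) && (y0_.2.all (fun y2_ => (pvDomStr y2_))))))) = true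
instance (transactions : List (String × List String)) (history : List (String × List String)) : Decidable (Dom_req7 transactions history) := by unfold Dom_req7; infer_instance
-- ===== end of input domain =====

-- B replaces A's scan-all-transactions counting (list membership test + list.index per item)
-- by an id->items dict index driven from the qualifying-id set, with counts in a dict.

-- ===== PORT A =====
def req7 (transactions : List (String × List String)) (history : List (String × List String)) : List String :=
  let list_I0 : List String := transactions.foldl (fun acc e => e.2.foldl (fun a i => a ++ [i]) acc) []
  let list_I : List String := PySem.List.sorted (PySem.Set.ofList list_I0) (fun x => x) false
  let list_cnt : List Int := List.replicate list_I.length 0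
  let list_min_len : List Int := history.foldl (fun acc e => acc ++ [(e.2.length : Int)]) []
  let list_T : List String := history.foldl (fun acc e =>
      match PySem.List.min? list_min_len (fun x => x) with
      | some m => if (e.2.length : Int) == m then e.2.foldl (fun a i => a ++ [i]) acc else acc
      | none => acc) []
  let cnt : List Int := transactions.foldl (fun c e =>
      if list_T.contains e.1 then
        e.2.foldl (fun c i =>
          match PySem.List.index? list_I i with
          | some j => PySem.List.pySetD c (j : Int) (PySem.List.pyGetD c (j : Int) 0 + 1)
          | none => c) c
      else c) list_cnt
  match PySem.List.max? cnt (fun x => x) with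
  | none => []
  | some mv =>
      ((PySem.List.pyRange 0 (list_I.length : Int) 1).filter
        (fun i => PySem.List.pyGetD cnt i 0 == mv)).map (fun i => PySem.List.pyGetD list_I i "")

-- ===== PORT B =====
def req7_alt (transactions : List (String × List String)) (history : List (String × List String)) : List String :=
  let index : PySem.Dict String (List String) :=
    transactions.foldl (fun d e => d.modify e.1 [] (fun v => v ++ e.2)) PySem.Dict.empty
  let univ : List String :=
    PySem.List.sorted (PySem.Set.ofList (transactions.flatMap (fun e => e.2))) (fun x => x) false
  let qual : PySem.Set String :=
    match PySem.List.min? (history.map (fun e => (e.2.length : Int))) (fun x => x) with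
    | none => PySem.Set.empty
    | some m => PySem.Set.ofList ((history.filter (fun e => (e.2.length : Int) == m)).flatMap (fun e => e.2))
  let counts : PySem.Dict String Int :=
    qual.foldl (fun c tid => (index.getD tid []).foldl (fun c i => c.modify i 0 (fun v => v + 1)) c)
      (univ.foldl (fun c i => c.insert i 0) PySem.Dict.empty)
  match PySem.List.max? counts.values (fun x => x) with
  | none => []
  | some best => univ.filter (fun i => counts.getD i 0 == best)

-- ===== PRECONDITION & SPEC =====
-- Pre_ excludes exactly the inputs where Python A raises: when the transactions carry no item
-- at all, max() is applied to the empty count list (ValueError).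
def Pre_req7 (transactions : List (String × List String)) (history : List (String × List String)) : Prop :=
  transactions.flatMap (fun e => e.2) ≠ []
instance (transactions : List (String × List String)) (history : List (String × List String)) : Decidable (Pre_req7 transactions history) := by unfold Pre_req7; infer_instance

def pvWitness_req7 : (List (String × List String)) × (List (String × List String)) :=
  ([("T1", ["I1", "I2"]), ("T2", ["I1"])], [("C1", ["T1"]), ("C2", ["T1", "T2"])])

def Spec_req7 (transactions : List (String × List String)) (history : List (String × List String)) (out : List String) : Prop := out = req7_alt transactions history
instance (transactions : List (String × List String)) (history : List (String × List String)) (out : List String) : Decidable (Spec_req7 transactions history out) := by unfold Spec_req7; infer_instance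

-- ===== CLAIM (what is proved, stated in full; the proofs are below) =====
def Claim_equal_req7 : Prop := ∀ (transactions : List (String × List String)) (history : List (String × List String)), Dom_req7 transactions history → Pre_req7 transactions history → Spec_req7 transactions history (req7 transactions history)

-- ===== LEMMAS AND PROOFS =====

-- A's append-one-by-one inner loop is list concatenation.
theorem pv_foldl_app (l : List String) (acc : List String) :
    l.foldl (fun a i => a ++ [i]) acc = acc ++ l := by
  induction l generalizing acc with
  | nil => simp
  | cons x t ih => simp [ih]

-- A's item-gathering double loop is flatMap.
theorem pv_listI0 (ts : List (String × List String)) :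
    ts.foldl (fun acc e => e.2.foldl (fun a i => a ++ [i]) acc) [] = ts.flatMap (fun e => e.2) := by
  have h : (fun (acc : List String) (e : String × List String) => e.2.foldl (fun a i => a ++ [i]) acc)
      = fun acc e => acc ++ e.2 := by
    funext acc e; exact pv_foldl_app e.2 acc
  rw [h, PySem.List.foldl_append_eq_flatMap]
  simp

-- A's length-collecting loop is map.
theorem pv_minlen (h : List (String × List String)) :
    h.foldl (fun acc e => acc ++ [(e.2.length : Int)]) [] = h.map (fun e => (e.2.length : Int)) := by
  have : ∀ (l : List (String × List String)) (acc : List Int),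
      l.foldl (fun acc e => acc ++ [(e.2.length : Int)]) acc = acc ++ l.map (fun e => (e.2.length : Int)) := by
    intro l
    induction l with
    | nil => simp
    | cons x t ih => intro acc; simp [ih]
  simpa using this h []

-- A's conditional gathering loop: filtered flatMap.
theorem pv_filter_flat (p : String × List String → Bool) (l : List (String × List String)) (acc : List String) :
    l.foldl (fun acc e => if p e then e.2.foldl (fun a i => a ++ [i]) acc else acc) acc
      = acc ++ (l.filter p).flatMap (fun e => e.2) := by
  have hf : (fun (acc : List String) (e : String × List String) =>
      if p e then e.2.foldl (fun a i => a ++ [i]) acc else acc)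
      = fun acc e => if p e then acc ++ e.2 else acc := by
    funext acc e
    by_cases hp : p e
    · rw [if_pos hp, if_pos hp, pv_foldl_app]
    · rw [if_neg hp, if_neg hp]
  rw [hf]
  induction l generalizing acc with
  | nil => simp
  | cons x t ih =>
      by_cases hp : p x
      · simp only [List.foldl_cons, hp, if_pos, List.filter_cons_of_pos, List.flatMap_cons]
        rw [ih, List.append_assoc]
      · simp only [List.foldl_cons, hp, if_neg, List.filter_cons_of_neg, Bool.false_eq_true,
          not_false_iff]
        rw [ih]

-- Characterisation of A's in-place counting loop over one item list.
theorem pv_inner (S : List String) (hnd : S.Nodup) (l : List String) (hl : ∀ i ∈ l, i ∈ S)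
    (g : String → Int) :
    l.foldl (fun c i =>
        match PySem.List.index? S i with
        | some j => PySem.List.pySetD c (j : Int) (PySem.List.pyGetD c (j : Int) 0 + 1)
        | none => c) (S.map g)
      = S.map (fun x => g x + (l.count x : Int)) := by
  induction l generalizing g with
  | nil => simp
  | cons i t ih =>
      have hi : i ∈ S := hl i (by simp)
      have ht : ∀ j ∈ t, j ∈ S := fun j hj => hl j (by simp [hj])
      obtain ⟨k, hk⟩ : ∃ k, List.idxOf? i S = some k := by
        cases hidx : List.idxOf? i S with
        | none => exact absurd (List.idxOf?_eq_none_iff.mp hidx) (by simp [hi])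
        | some k => exact ⟨k, rfl⟩
      obtain ⟨hklt, hSk, -⟩ := List.idxOf?_eq_some_iff.mp hk
      have hmaps : PySem.List.pySetD (S.map g) (k : Int)
            (PySem.List.pyGetD (S.map g) (k : Int) 0 + 1)
          = S.map (fun x => if x = i then g x + 1 else g x) := by
        rw [PySem.List.pySetD_natCast, PySem.List.pyGetD_natCast]
        have hget : (S.map g).getD k 0 = g i := by
          rw [List.getD_eq_getElem _ _ (by simpa using hklt)]
          simp [hSk]
        rw [hget]
        apply List.ext_getElem (by simp)
        intro j hj1 hj2
        rw [List.getElem_set]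
        by_cases hjk : k = j
        · subst hjk; simp [hSk]
        · have hjlen : j < S.length := by simpa using hj2
          have hne : S[j] ≠ i := by
            intro he
            exact hjk ((List.Nodup.getElem_inj_iff hnd).mp (hSk.trans he.symm))
          rw [if_neg hjk]
          simp [hne]
      rw [List.foldl_cons, PySem.List.index?_eq_idxOf?, hk]
      simp only []
      rw [hmaps, ih ht]
      apply List.map_congr_left
      intro x hx
      by_cases hxi : x = i
      · subst hxi; simp; omega
      · have : ¬ (i == x) = true := by simpa using fun he => hxi (by simp_all)
        simp [List.count_cons, hxi, this]

-- Characterisation of A's counting loop over all transactions.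
theorem pv_outer (S : List String) (hnd : S.Nodup) (q : List String)
    (ts : List (String × List String)) (hts : ∀ e ∈ ts, ∀ i ∈ e.2, i ∈ S) (g : String → Int) :
    ts.foldl (fun c e =>
        if q.contains e.1 then
          e.2.foldl (fun c i =>
            match PySem.List.index? S i with
            | some j => PySem.List.pySetD c (j : Int) (PySem.List.pyGetD c (j : Int) 0 + 1)
            | none => c) c
        else c) (S.map g)
      = S.map (fun x => g x + (((ts.filter (fun e => q.contains e.1)).flatMap (fun e => e.2)).count x : Int)) := by
  induction ts generalizing g with
  | nil => simp
  | cons e t ih =>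
      have he : ∀ i ∈ e.2, i ∈ S := hts e (by simp)
      have htl : ∀ e' ∈ t, ∀ i ∈ e'.2, i ∈ S := fun e' h' => hts e' (by simp [h'])
      by_cases hq : q.contains e.1
      · rw [List.foldl_cons]
        simp only [hq, if_pos]
        rw [pv_inner S hnd e.2 he g, ih htl]
        have hfil : List.filter (fun e => q.contains e.1) (e :: t)
            = e :: List.filter (fun e => q.contains e.1) t := List.filter_cons_of_pos hq
        rw [hfil]
        apply List.map_congr_left
        intro x _
        rw [List.flatMap_cons, List.count_append]
        push_cast
        ring
      · rw [List.foldl_cons]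
        simp only [hq]
        rw [if_neg (by simp_all), ih htl]
        have hfil : List.filter (fun e => q.contains e.1) (e :: t)
            = List.filter (fun e => q.contains e.1) t := List.filter_cons_of_neg (by simp_all)
        rw [hfil]
  
-- B's index dict: lookup = concatenation of the item lists of that id's transactions.
theorem pv_index (ts : List (String × List String)) (d : PySem.Dict String (List String)) (c : String) :
    (ts.foldl (fun d e => d.modify e.1 [] (fun v => v ++ e.2)) d).getD c []
      = d.getD c [] ++ (ts.filter (fun e => e.1 == c)).flatMap (fun e => e.2) := by
  induction ts generalizing d with
  | nil => simp
  | cons e t ih =>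
      rw [List.foldl_cons, ih]
      rw [PySem.Dict.getD_modify]
      by_cases hc : c = e.1
      · subst hc; simp
      · have : ¬ (e.1 == c) = true := by simpa using fun he => hc (by simp_all)
        simp [hc, this]

-- The zero-initialisation loop leaves every lookup at 0.
theorem pv_init0 (l : List String) (d : PySem.Dict String Int) (x : String)
    (hd : d.getD x 0 = 0) :
    (l.foldl (fun c i => c.insert i (0 : Int)) d).getD x 0 = 0 := by
  induction l generalizing d with
  | nil => simpa using hd
  | cons i t ih =>
      rw [List.foldl_cons]
      apply ih
      rw [PySem.Dict.getD_insert]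
      split <;> simp [hd]

-- B's per-id counting loop, summed over the driving list.
theorem pv_bouter (F : String → List String) (q : List String) (c : PySem.Dict String Int) (x : String) :
    (q.foldl (fun c tid => (F tid).foldl (fun c i => c.modify i 0 (fun v => v + 1)) c) c).getD x 0
      = c.getD x 0 + (q.map (fun tid => ((F tid).count x : Int))).sum := by
  induction q generalizing c with
  | nil => simp
  | cons tid t ih =>
      rw [List.foldl_cons, ih]
      rw [PySem.Dict.getD_foldl_modify_add_one]
      simp [add_assoc]

-- Sum over a duplicate-free id list of an indicator-style term.
theorem pv_sum_if (q : List String) (hq : q.Nodup) (a : String) (k : Int) :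
    (q.map (fun tid => if a = tid then k else 0)).sum
      = if a ∈ q then k else 0 := by
  induction q with
  | nil => simp
  | cons tid t ih =>
      have hnd := (List.nodup_cons.mp hq).2
      have hna := (List.nodup_cons.mp hq).1
      rw [List.map_cons, List.sum_cons, ih hnd]
      by_cases ha : a = tid
      · subst ha
        rw [if_pos rfl, if_neg hna, if_pos (by simp)]
        ring
      · rw [if_neg ha]
        by_cases hm : a ∈ t
        · rw [if_pos hm, if_pos (by simp [hm])]
          ring
        · rw [if_neg hm, if_neg (by simp [ha, hm])]
          ring

-- Exchanging the two summations: group-by-id counting equals filtered counting.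
theorem pv_swap (ts : List (String × List String)) (q : List String) (hq : q.Nodup) (x : String) :
    (q.map (fun tid => (((ts.filter (fun e => e.1 == tid)).flatMap (fun e => e.2)).count x : Int))).sum
      = (((ts.filter (fun e => q.contains e.1)).flatMap (fun e => e.2)).count x : Int) := by
  induction ts with
  | nil => simp
  | cons e t ih =>
      have hsplit : (fun tid => (((List.filter (fun e' => e'.1 == tid) (e :: t)).flatMap (fun e => e.2)).count x : Int))
          = fun tid => (if (e.1 == tid) = true then (e.2.count x : Int) else 0)
              + (((t.filter (fun e' => e'.1 == tid)).flatMap (fun e => e.2)).count x : Int) := by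
        funext tid
        by_cases hc : (e.1 == tid) = true
        · simp [hc]
        · simp [hc]
      rw [hsplit, List.sum_map_add]
      have h1 : q.map (fun tid => if (e.1 == tid) = true then (e.2.count x : Int) else 0)
          = q.map (fun tid => if e.1 = tid then (e.2.count x : Int) else 0) := by
        apply List.map_congr_left
        intro tid _
        simp [beq_iff_eq]
      rw [h1, pv_sum_if q hq e.1 ((e.2.count x : Int)), ih]
      by_cases hm : e.1 ∈ q
      · have hfil : List.filter (fun e => q.contains e.1) (e :: t)
            = e :: List.filter (fun e => q.contains e.1) t :=
          List.filter_cons_of_pos (by simpa using hm)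
        rw [hfil, if_pos hm, List.flatMap_cons, List.count_append]
        push_cast
        ring
      · have hfil : List.filter (fun e => q.contains e.1) (e :: t)
            = List.filter (fun e => q.contains e.1) t :=
          List.filter_cons_of_neg (by simpa using hm)
        rw [hfil, if_neg hm, zero_add]

-- Keys of B's counts dict stay exactly the item universe.
theorem pv_keys (U : List String) (F : String → List String)
    (hF : ∀ tid, ∀ i ∈ F tid, i ∈ U) (q : List String) (c : PySem.Dict String Int)
    (hc : c.keys = U) :
    (q.foldl (fun c tid => (F tid).foldl (fun c i => c.modify i 0 (fun v => v + 1)) c) c).keys = U := by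
  induction q generalizing c with
  | nil => simpa using hc
  | cons tid t ih =>
      rw [List.foldl_cons]
      apply ih
      rw [PySem.Dict.keys_foldl_modify, hc, PySem.Set.update_eq_append_filter]
      have : (PySem.Set.ofList (F tid)).filter (fun y => !(PySem.Set.contains U y)) = [] := by
        apply List.filter_eq_nil_iff.mpr
        intro a ha
        have := hF tid a ((PySem.Set.mem_ofList _ _).mp ha)
        simp [PySem.Set.contains_eq_listContains, this]
      rw [this, List.append_nil]

-- The final comprehension over range(len(S)) is a filter over S.
theorem pv_comp (S : List String) (g : String → Int) (mv : Int) :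
    ((PySem.List.pyRange 0 (S.length : Int) 1).filter
        (fun i => PySem.List.pyGetD (S.map g) i 0 == mv)).map (fun i => PySem.List.pyGetD S i "")
      = S.filter (fun x => g x == mv) := by
  induction S using List.reverseRecOn with
  | nil => simp [PySem.List.pyRange]
  | append_singleton S a ih =>
      have hlen : ((S ++ [a]).length : Int) = (S.length : Int) + 1 := by simp
      rw [hlen, PySem.List.pyRange_one_append 0 (S.length : Int) ((S.length : Int) + 1)
            (by positivity) (by omega)]
      have hone : PySem.List.pyRange (S.length : Int) ((S.length : Int) + 1) 1
          = [(S.length : Int)] := by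
        rw [PySem.List.pyRange_one_cons (by omega)]
        have : PySem.List.pyRange ((S.length : Int) + 1) ((S.length : Int) + 1) 1 = [] := by
          simp [PySem.List.pyRange]
        rw [this]
      rw [hone, List.filter_append, List.map_append]
      have hfc : (PySem.List.pyRange 0 (S.length : Int) 1).filter
            (fun i => PySem.List.pyGetD ((S ++ [a]).map g) i 0 == mv)
          = (PySem.List.pyRange 0 (S.length : Int) 1).filter
            (fun i => PySem.List.pyGetD (S.map g) i 0 == mv) := by
        apply List.filter_congr
        intro i hi
        obtain ⟨j, hj, rfl⟩ : ∃ j : ℕ, j < S.length ∧ (j : Int) = i := by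
          have h1 := PySem.List.mem_pyRange_one.mp hi
          exact ⟨i.toNat, by omega, by omega⟩
        rw [PySem.List.pyGetD_natCast, PySem.List.pyGetD_natCast]
        have : ((S ++ [a]).map g).getD j 0 = (S.map g).getD j 0 := by
          rw [List.map_append]
          rw [List.getD_eq_getElem _ _ (by simp; omega), List.getD_eq_getElem _ _ (by simp [hj])]
          rw [List.getElem_append_left (by simp [hj])]
        rw [this]
      rw [hfc]
      have hmc : ((PySem.List.pyRange 0 (S.length : Int) 1).filter
            (fun i => PySem.List.pyGetD (S.map g) i 0 == mv)).map
              (fun i => PySem.List.pyGetD (S ++ [a]) i "")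
          = ((PySem.List.pyRange 0 (S.length : Int) 1).filter
            (fun i => PySem.List.pyGetD (S.map g) i 0 == mv)).map
              (fun i => PySem.List.pyGetD S i "") := by
        apply List.map_congr_left
        intro i hi
        have hi' := List.mem_filter.mp hi
        obtain ⟨j, hj, rfl⟩ : ∃ j : ℕ, j < S.length ∧ (j : Int) = i := by
          have h1 := PySem.List.mem_pyRange_one.mp hi'.1
          exact ⟨i.toNat, by omega, by omega⟩
        rw [PySem.List.pyGetD_natCast, PySem.List.pyGetD_natCast]
        rw [List.getD_eq_getElem _ _ (by simp; omega), List.getD_eq_getElem _ _ (by simp [hj])]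
        rw [List.getElem_append_left (by simp [hj])]
      rw [hmc, ih]
      -- the singleton index S.length picks out a
      have hgs : PySem.List.pyGetD (S ++ [a]) ((S.length : Int)) "" = a := by
        rw [PySem.List.pyGetD_natCast]
        rw [List.getD_eq_getElem _ _ (by simp)]
        rw [List.getElem_append_right (by simp)]
        simp
      by_cases hv : (g a == mv) = true
      · simp [hv, hgs]
      · simp [hv]

-- [0]*len(l) as a constant map over l.
theorem pv_repl (l : List String) : List.replicate l.length (0 : Int) = l.map (fun _ => 0) := by
  induction l with
  | nil => rfl
  | cons a t ih => rw [List.length_cons, List.replicate_succ, ih, List.map_cons]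

-- The common core: A's counting/argmax against B's, for a fixed qualifying-id list T.
theorem pv_main (ts : List (String × List String)) (T : List String)
    (hSnd : (PySem.List.sorted (PySem.Set.ofList (ts.flatMap (fun (e : String × List String) => e.2))) (fun x => x) false).Nodup)
    (hmemS : ∀ x, x ∈ PySem.List.sorted (PySem.Set.ofList (ts.flatMap (fun (e : String × List String) => e.2))) (fun x => x) false
        ↔ x ∈ ts.flatMap (fun (e : String × List String) => e.2)) :
    (match PySem.List.max? (ts.foldl (fun (c : List Int) (e : String × List String) =>
        if T.contains e.1 then
          e.2.foldl (fun c i =>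
            match PySem.List.index? (PySem.List.sorted (PySem.Set.ofList (ts.flatMap (fun (e : String × List String) => e.2))) (fun x => x) false) i with
            | some j => PySem.List.pySetD c (j : Int) (PySem.List.pyGetD c (j : Int) 0 + 1)
            | none => c) c
        else c)
        (List.replicate (PySem.List.sorted (PySem.Set.ofList (ts.flatMap (fun (e : String × List String) => e.2))) (fun x => x) false).length 0)) (fun x => x) with
     | none => []
     | some mv =>
        ((PySem.List.pyRange 0 ((PySem.List.sorted (PySem.Set.ofList (ts.flatMap (fun (e : String × List String) => e.2))) (fun x => x) false).length : Int) 1).filter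
          (fun i => PySem.List.pyGetD (ts.foldl (fun (c : List Int) (e : String × List String) =>
            if T.contains e.1 then
              e.2.foldl (fun c i =>
                match PySem.List.index? (PySem.List.sorted (PySem.Set.ofList (ts.flatMap (fun (e : String × List String) => e.2))) (fun x => x) false) i with
                | some j => PySem.List.pySetD c (j : Int) (PySem.List.pyGetD c (j : Int) 0 + 1)
                | none => c) c
            else c)
            (List.replicate (PySem.List.sorted (PySem.Set.ofList (ts.flatMap (fun (e : String × List String) => e.2))) (fun x => x) false).length 0)) i 0 == mv)).map
          (fun i => PySem.List.pyGetD (PySem.List.sorted (PySem.Set.ofList (ts.flatMap (fun (e : String × List String) => e.2))) (fun x => x) false) i ""))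
    =
    (match PySem.List.max? ((PySem.Set.ofList T).foldl (fun (c : PySem.Dict String Int) (tid : String) =>
          ((ts.foldl (fun (d : PySem.Dict String (List String)) (e : String × List String) => d.modify e.1 [] (fun v => v ++ e.2)) PySem.Dict.empty).getD tid []).foldl
            (fun c i => c.modify i 0 (fun v => v + 1)) c)
        ((PySem.List.sorted (PySem.Set.ofList (ts.flatMap (fun (e : String × List String) => e.2))) (fun x => x) false).foldl
          (fun c i => c.insert i 0) PySem.Dict.empty)).values (fun x => x) with
     | none => []
     | some best =>
        (PySem.List.sorted (PySem.Set.ofList (ts.flatMap (fun (e : String × List String) => e.2))) (fun x => x) false).filter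
          (fun i => ((PySem.Set.ofList T).foldl (fun (c : PySem.Dict String Int) (tid : String) =>
              ((ts.foldl (fun (d : PySem.Dict String (List String)) (e : String × List String) => d.modify e.1 [] (fun v => v ++ e.2)) PySem.Dict.empty).getD tid []).foldl
                (fun c i => c.modify i 0 (fun v => v + 1)) c)
            ((PySem.List.sorted (PySem.Set.ofList (ts.flatMap (fun (e : String × List String) => e.2))) (fun x => x) false).foldl
              (fun c i => c.insert i 0) PySem.Dict.empty)).getD i 0 == best)) := by
  set items : List String := ts.flatMap (fun e => e.2) with hitems
  set S : List String := PySem.List.sorted (PySem.Set.ofList items) (fun x => x) false with hSdef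
  set RA : List String := (ts.filter (fun e => T.contains e.1)).flatMap (fun e => e.2) with hRA
  set index : PySem.Dict String (List String) :=
    ts.foldl (fun d e => d.modify e.1 [] (fun v => v ++ e.2)) PySem.Dict.empty with hindex
  set initd : PySem.Dict String Int :=
    S.foldl (fun c i => c.insert i 0) PySem.Dict.empty with hinitd
  set counts : PySem.Dict String Int :=
    (PySem.Set.ofList T).foldl (fun c tid =>
      (index.getD tid []).foldl (fun c i => c.modify i 0 (fun v => v + 1)) c) initd with hcounts
  set cntA : List Int := ts.foldl (fun c e =>
      if T.contains e.1 then
        e.2.foldl (fun c i =>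
          match PySem.List.index? S i with
          | some j => PySem.List.pySetD c (j : Int) (PySem.List.pyGetD c (j : Int) 0 + 1)
          | none => c) c
      else c) (List.replicate S.length 0) with hcntA
  have hts : ∀ e ∈ ts, ∀ i ∈ e.2, i ∈ S := by
    intro e he i hi
    exact (hmemS i).mpr (List.mem_flatMap.mpr ⟨e, he, hi⟩)
  have hcnt : cntA = S.map (fun x => (RA.count x : Int)) := by
    rw [hcntA, pv_repl S, pv_outer S hSnd T ts hts (fun _ => 0)]
    apply List.map_congr_left
    intro x _
    rw [zero_add]
  have hgetDidx : ∀ tid : String, index.getD tid []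
      = (ts.filter (fun e => e.1 == tid)).flatMap (fun e => e.2) := by
    intro tid
    rw [hindex, pv_index ts PySem.Dict.empty tid, PySem.Dict.getD_empty, List.nil_append]
  have hqnd : (PySem.Set.ofList T).Nodup := PySem.Set.nodup_ofList T
  have hinit : ∀ x : String, initd.getD x 0 = 0 := by
    intro x
    exact pv_init0 S PySem.Dict.empty x (PySem.Dict.getD_empty x 0)
  have hcontq : ∀ a : String, List.contains (PySem.Set.ofList T) a = T.contains a := by
    intro a
    by_cases hm : a ∈ T
    · simp [(PySem.Set.mem_ofList T a).mpr hm, hm]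
    · have hn : a ∉ PySem.Set.ofList T := fun hc => hm ((PySem.Set.mem_ofList T a).mp hc)
      simp [hn, hm]
  have hcountsD : ∀ x : String, counts.getD x 0 = (RA.count x : Int) := by
    intro x
    rw [hcounts, pv_bouter (fun tid => index.getD tid []) (PySem.Set.ofList T) initd x,
        hinit x, zero_add]
    have hmc : (PySem.Set.ofList T).map (fun tid => ((index.getD tid []).count x : Int))
        = (PySem.Set.ofList T).map (fun tid =>
            (((ts.filter (fun e => e.1 == tid)).flatMap (fun e => e.2)).count x : Int)) := by
      apply List.map_congr_left
      intro tid _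
      rw [hgetDidx tid]
    rw [hmc, pv_swap ts (PySem.Set.ofList T) hqnd x]
    have hfc : ts.filter (fun e => List.contains (PySem.Set.ofList T) e.1)
        = ts.filter (fun e => T.contains e.1) := by
      apply List.filter_congr
      intro e _
      exact hcontq e.1
    rw [hfc]
  have hF : ∀ tid : String, ∀ i ∈ index.getD tid [], i ∈ S := by
    intro tid i hi
    rw [hgetDidx tid] at hi
    obtain ⟨e, he, hie⟩ := List.mem_flatMap.mp hi
    exact hts e (List.mem_of_mem_filter he) i hie
  have hinitkeys : initd.keys = S := by
    rw [hinitd, PySem.Dict.keys_foldl_insert, PySem.Dict.keys_empty, PySem.Set.update_nil_left,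
      PySem.Set.ofList_eq_self_of_nodup S hSnd]
  have hkeys : counts.keys = S := by
    rw [hcounts]
    exact pv_keys S (fun tid => index.getD tid []) hF (PySem.Set.ofList T) initd hinitkeys
  have hvalues : counts.values = S.map (fun x => (RA.count x : Int)) := by
    have hv := PySem.Dict.values_eq_map_keys counts (by rw [hkeys]; exact hSnd) 0
    rw [hv, hkeys]
    apply List.map_congr_left
    intro x _
    exact hcountsD x
  simp only [hcnt, hvalues]
  cases hmax : PySem.List.max? (S.map (fun x => (RA.count x : Int))) (fun x => x) with
  | none => rfl
  | some mv =>
      simp only []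
      rw [pv_comp S (fun x => (RA.count x : Int)) mv]
      apply List.filter_congr
      intro x _
      rw [hcountsD x]

-- ===== VERDICT (by name: the statement is the Claim_ definition above) =====
theorem req7_spec : Claim_equal_req7 := by
  intro ts h _dom _hpre
  unfold Spec_req7
  simp only [req7, req7_alt, pv_listI0, pv_minlen]
  -- shared abbreviations
  set items : List String := ts.flatMap (fun e => e.2) with hitems
  set S : List String := PySem.List.sorted (PySem.Set.ofList items) (fun x => x) false with hS
  have hSnd : S.Nodup :=
    ((PySem.List.sorted_perm (PySem.Set.ofList items) (fun x => x) false).nodup_iff).mpr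
      (PySem.Set.nodup_ofList items)
  have hmemS : ∀ x, x ∈ S ↔ x ∈ items := by
    intro x
    rw [hS, PySem.List.mem_sorted, PySem.Set.mem_ofList]
  -- resolve the min of the history lengths once
  cases hM : PySem.List.min? (h.map (fun e => (e.2.length : Int))) (fun x => x) with
  | none =>
      -- empty history: no qualifying ids on either side
      have hh : h = [] := by
        have := (PySem.List.min?_eq_none_iff _ _).mp hM
        simpa using this
      subst hh
      simp only [List.foldl_nil]
      exact pv_main ts [] hSnd hmemS
  | some m =>
      simp only [pv_filter_flat, List.nil_append]
      exact pv_main ts ((h.filter (fun e => (e.2.length : Int) == m)).flatMap (fun e => e.2))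
        hSnd hmemS
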